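-- pv_equiv track=rewrite | github.com/mohenjo/codingdojang | CodingDojang/낱말퍼즐만들기/main.py | gen_crosswords
-- ===== SOURCE A (Python) =====
-- def gen_crosswords(word_a: str, word_b: str):
--     # 교점 존재 여부 찾기
--     foo = tuple(word_a.find(c) for c in word_b if word_a.find(c) != -1)
--     if not len(foo):
--         return
--     # 교점 위치에 대한 각 문자열 내 인덱스
--     idx_a, idx_b = foo[0], word_b.find(word_a[foo[0]])
--     # 반환 문자 배열 생성
--     result = ['.' * idx_a + v + '.' * (len(word_a) - idx_a - 1) for _, v in enumerate(word_b)]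
--     result[idx_b] = word_a
--     return '\n'.join(result)
-- ===== SOURCE B (Python) =====
-- def gen_crosswords(word_a: str, word_b: str):
--     # index word_a's chars once: first occurrence of each char
--     first_in_a = {}
--     for i, ch in enumerate(word_a):
--         if ch not in first_in_a:
--             first_in_a[ch] = i
--     # crossing row = first position of word_b whose char is indexed
--     ib = next((j for j, ch in enumerate(word_b) if ch in first_in_a), None)
--     if ib is None:
--         return None
--     ia = first_in_a[word_b[ib]]
--     # per-cell closed form: grid[j][i] depends only on (i, j, ia, ib)
--     return '\n'.join(
--         ''.join(word_a[i] if j == ib else (word_b[j] if i == ia else '.')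
--                 for i in range(len(word_a)))
--         for j in range(len(word_b)))
-- ===== Notes on version B (the rewrite author's own statement) =====
-- stated objective: alternative
-- what changed: B replaces A's repeated str.find scans with a first-occurrence dict over word_a built once, and replaces A's padded-row strings plus crossing-row overwrite with a per-cell closed form grid[j][i] = word_a[i] if j==ib else word_b[j] if i==ia else '.' emitted over two ranges.
import Mathlib
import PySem

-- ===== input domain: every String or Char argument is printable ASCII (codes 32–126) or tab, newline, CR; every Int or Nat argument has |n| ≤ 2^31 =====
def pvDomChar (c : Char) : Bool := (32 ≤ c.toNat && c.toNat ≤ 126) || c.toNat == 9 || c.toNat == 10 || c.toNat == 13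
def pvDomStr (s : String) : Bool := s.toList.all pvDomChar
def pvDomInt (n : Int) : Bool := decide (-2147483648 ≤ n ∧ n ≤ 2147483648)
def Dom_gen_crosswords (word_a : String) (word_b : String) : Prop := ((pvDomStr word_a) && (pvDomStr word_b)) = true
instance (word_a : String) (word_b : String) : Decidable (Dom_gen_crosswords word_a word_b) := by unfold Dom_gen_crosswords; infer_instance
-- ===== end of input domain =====

-- B indexes word_a's characters in a dict built once (no repeated str.find scans) and emits the
-- grid by a per-cell closed form over (row, column) instead of A's padded-row strings plus a
-- crossing-row overwrite; same cost, different decomposition.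

-- ===== PORT A =====
def gen_crosswords (word_a : String) (word_b : String) : Option String :=
  -- foo = tuple(word_a.find(c) for c in word_b if word_a.find(c) != -1)
  let foo : List Int := word_b.toList.filterMap (fun c =>
    if PySem.Str.find word_a (String.ofList [c]) ≠ -1
    then some (PySem.Str.find word_a (String.ofList [c])) else none)
  -- if not len(foo): return   /   idx_a = foo[0]
  match foo with
  | [] => none
  | idx_a :: _ =>
    -- word_a[foo[0]]: IndexError = none (unreachable: foo[0] is a successful find result)
    match PySem.Str.pyGet? word_a idx_a with
    | none => none
    | some ch =>
      -- idx_b = word_b.find(word_a[foo[0]])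
      let idx_b := PySem.Str.find word_b (String.ofList [ch])
      -- result = ['.' * idx_a + v + '.' * (len(word_a) - idx_a - 1) for _, v in enumerate(word_b)]
      -- ('.' * k for Int k = replicate k.toNat '.': both give '' for k ≤ 0)
      let result : List String := (PySem.List.enumerate word_b.toList).map (fun p =>
        String.ofList (List.replicate idx_a.toNat '.' ++ [p.2] ++
          List.replicate (PySem.Str.len word_a - idx_a - 1).toNat '.'))
      -- result[idx_b] = word_a  (IndexError = none; unreachable here)
      match PySem.List.pySet? result idx_b word_a with
      | none => none
      | some result => some (PySem.Str.join "\n" result)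

-- ===== PORT B =====
-- next((j for j, ch in enumerate(word_b) if ch in first_in_a), None)
def gcFirstIdx (d : PySem.Dict Char Int) : List (Int × Char) → Option Int
  | [] => none
  | p :: rest => if d.contains p.2 then some p.1 else gcFirstIdx d rest

def gen_crosswords_alt (word_a : String) (word_b : String) : Option String :=
  -- first_in_a = {}; for i, ch in enumerate(word_a): if ch not in first_in_a: first_in_a[ch] = i
  let first_in_a : PySem.Dict Char Int :=
    (PySem.List.enumerate word_a.toList).foldl
      (fun d p => if d.contains p.2 then d else d.insert p.2 p.1) PySem.Dict.empty
  match gcFirstIdx first_in_a (PySem.List.enumerate word_b.toList) with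
  | none => none
  | some ib =>
    -- word_b[ib] then first_in_a[...]: both always succeed here (ib indexes word_b and its
    -- char was found in the dict); the none branches are unreachable
    match PySem.Str.pyGet? word_b ib with
    | none => none
    | some ch =>
      match first_in_a.get? ch with
      | none => none
      | some ia =>
        -- '\n'.join(''.join(word_a[i] if j == ib else (word_b[j] if i == ia else '.')
        --           for i in range(len(word_a))) for j in range(len(word_b)))
        -- (word_a[i] / word_b[j] ported as pyGetD: the indices come from range, always in bounds)
        some (PySem.Str.join "\n" ((PySem.List.pyRange 0 (PySem.Str.len word_b)).map (fun j =>
          String.ofList ((PySem.List.pyRange 0 (PySem.Str.len word_a)).map (fun i =>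
            if j == ib then PySem.List.pyGetD word_a.toList i '.'
            else if i == ia then PySem.List.pyGetD word_b.toList j '.' else '.')))))

-- ===== PRECONDITION & SPEC =====
def Spec_gen_crosswords (word_a : String) (word_b : String) (out : Option String) : Prop := out = gen_crosswords_alt word_a word_b
instance (word_a : String) (word_b : String) (out : Option String) : Decidable (Spec_gen_crosswords word_a word_b out) := by unfold Spec_gen_crosswords; infer_instance

-- ===== CLAIM (what is proved, stated in full; the proofs are below) =====
def Claim_equal_gen_crosswords : Prop := ∀ (word_a : String) (word_b : String), Dom_gen_crosswords word_a word_b → Spec_gen_crosswords word_a word_b (gen_crosswords word_a word_b)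

-- ===== LEMMAS AND PROOFS =====

-- a one-char prefix is just the head
theorem gc_single_prefix (c : Char) (l : List Char) : [c] <+: l ↔ l.head? = some c := by
  cases l with
  | nil => simp
  | cons x xs =>
    constructor
    · intro h
      rcases h with ⟨t, ht⟩
      simp at ht
      simp [ht.1]
    · intro h
      simp at h
      exact ⟨xs, by simp [h]⟩

-- a one-char infix is membership
theorem gc_single_infix (c : Char) (l : List Char) : [c] <:+: l ↔ c ∈ l := by
  constructor
  · intro h
    exact h.subset (by simp)
  · intro h
    rcases List.append_of_mem h with ⟨pre, suf, rfl⟩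
    exact ⟨pre, suf, by simp⟩

-- str.find on a single-char needle that is present = idxOf
theorem gc_findChar (as : List Char) (c : Char) (h : c ∈ as) :
    PySem.Chars.find as [c] = (as.idxOf c : Int) := by
  have hinf : [c] <:+: as := (gc_single_infix c as).mpr h
  have h0 : 0 ≤ PySem.Chars.find as [c] := (PySem.Chars.find_nonneg_iff as [c]).mpr hinf
  obtain ⟨hpre, hmin⟩ := PySem.Chars.find_spec h0
  set k := (PySem.Chars.find as [c]).toNat with hk
  have hgetk : as[k]? = some c := by
    rw [← List.head?_drop]; exact (gc_single_prefix c _).mp hpre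
  have hklt : k < as.length := (List.getElem?_eq_some_iff.mp hgetk).1
  have hidxlt : as.idxOf c < as.length := List.idxOf_lt_length_of_mem h
  have h1 : ¬ as.idxOf c < k := by
    intro hlt
    exact hmin _ hlt ((gc_single_prefix c _).mpr
      (by rw [List.head?_drop]; exact List.getElem?_idxOf h))
  have h2 : ¬ k < as.idxOf c := by
    intro hlt
    have : c ∈ as.take (k + 1) := by
      have : (as.take (k + 1))[k]? = some c := by
        rw [List.getElem?_take]; simp [hgetk]
      exact List.mem_of_getElem? this
    have := (List.mem_take_iff_idxOf_lt h).mp this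
    omega
  have : as.idxOf c = k := by omega
  omega

-- str.find on a single absent char = -1
theorem gc_findChar_none (as : List Char) (c : Char) (h : c ∉ as) :
    PySem.Chars.find as [c] = -1 :=
  (PySem.Chars.find_eq_neg_one_iff as [c]).mpr (fun hin => h ((gc_single_infix c as).mp hin))

theorem gc_filterMap_none (word_a : String) (pre : List Char) (hpre : ∀ x ∈ pre, x ∉ word_a.toList) :
    pre.filterMap (fun c =>
      if PySem.Str.find word_a (String.ofList [c]) ≠ -1
      then some (PySem.Str.find word_a (String.ofList [c])) else none) = [] := by
  rw [List.filterMap_eq_nil_iff]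
  intro c hc
  have h1 : PySem.Chars.find word_a.toList [c] = -1 :=
    gc_findChar_none word_a.toList c (hpre c hc)
  simp [h1]

-- B's first-occurrence index dict: lookup = first index in as (none if absent)
theorem gc_index_get (as : List Char) (s : Int) (d : PySem.Dict Char Int) (c : Char) :
    ((PySem.List.enumerate as s).foldl
        (fun d p => if d.contains p.2 then d else d.insert p.2 p.1) d).get? c
      = (d.get? c).or (if c ∈ as then some (s + (as.idxOf c : Int)) else none) := by
  induction as generalizing s d with
  | nil => simp [PySem.List.enumerate_nil]
  | cons a rest ih =>
    rw [PySem.List.enumerate_cons, List.foldl_cons, ih]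
    by_cases hca : c = a
    · subst hca
      by_cases hcd : d.contains c = true
      · have hsome : (d.get? c).isSome := by rw [← PySem.Dict.contains_eq_isSome_get?]; exact hcd
        rcases Option.isSome_iff_exists.mp hsome with ⟨v, hv⟩
        simp [hcd, hv]
      · have hnone : d.get? c = none := (PySem.Dict.get?_eq_none_iff_contains d c).mpr
          (by simpa using hcd)
        simp [hcd, hnone, PySem.Dict.get?_insert_self]
    · have hmem : c ∈ a :: rest ↔ c ∈ rest := by simp [hca]
      have hidx : (a :: rest).idxOf c = rest.idxOf c + 1 := List.idxOf_cons_ne rest (by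
        simpa using fun h => hca h.symm)
      by_cases hcd : d.contains a = true
      · simp only [hcd, if_true, hmem, hidx]
        by_cases hc : c ∈ rest <;> simp [hc]; ring_nf
      · simp only [hcd, if_false, Bool.false_eq_true, hmem, hidx,
          PySem.Dict.get?_insert_of_ne d _ hca]
        by_cases hc : c ∈ rest <;> simp [hc]; ring_nf

-- gcFirstIdx = none means no char occurs in as (via the dict characterisation)
theorem gc_firstIdx_none (as : List Char) (D : PySem.Dict Char Int)
    (hD : ∀ c, D.contains c = decide (c ∈ as))
    (bs : List Char) (s : Int)
    (h : gcFirstIdx D (PySem.List.enumerate bs s) = none) : ∀ c ∈ bs, c ∉ as := by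
  induction bs generalizing s with
  | nil => simp
  | cons c rest ih =>
    rw [PySem.List.enumerate_cons, gcFirstIdx] at h
    by_cases hc : c ∈ as
    · rw [hD c] at h; simp [hc] at h
    · intro x hx
      rcases List.mem_cons.mp hx with rfl | hx
      · exact hc
      · exact ih (s + 1) (by rw [hD c] at h; simpa [hc] using h) x hx

-- gcFirstIdx = some decomposes bs at the first char occurring in as
theorem gc_firstIdx_some (as : List Char) (D : PySem.Dict Char Int)
    (hD : ∀ c, D.contains c = decide (c ∈ as))
    (bs : List Char) (s : Int) (j : Int)
    (h : gcFirstIdx D (PySem.List.enumerate bs s) = some j) :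
    ∃ pre c suf, bs = pre ++ c :: suf ∧ (∀ x ∈ pre, x ∉ as) ∧ c ∈ as ∧
      j = s + pre.length := by
  induction bs generalizing s with
  | nil => simp [PySem.List.enumerate_nil, gcFirstIdx] at h
  | cons c rest ih =>
    rw [PySem.List.enumerate_cons, gcFirstIdx] at h
    by_cases hc : c ∈ as
    · rw [hD c] at h
      simp [hc] at h
      exact ⟨[], c, rest, by simp, by simp, hc, by simp [h]⟩
    · rw [hD c] at h
      rcases ih (s + 1) (by simpa [hc] using h) with ⟨pre, c', suf, hbs, hpre, hc', hj⟩
      refine ⟨c :: pre, c', suf, by simp [hbs], ?_, hc', by simp [hj]; ring⟩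
      intro x hx
      rcases List.mem_cons.mp hx with rfl | hx
      · exact hc
      · exact hpre x hx

-- a row of B's per-cell grid away from the crossing row = A's padded row
theorem gc_row_eq (n ia : Nat) (hia : ia < n) (v : Char) :
    (List.range n).map (fun i => if i = ia then v else '.')
      = List.replicate ia '.' ++ v :: List.replicate (n - ia - 1) '.' := by
  apply List.ext_getElem
  · simp; omega
  · intro k h1 h2
    simp only [List.getElem_map, List.getElem_range]
    rcases lt_trichotomy k ia with hk | hk | hk
    · rw [List.getElem_append_left (by simpa using hk)]
      simp [Nat.ne_of_lt hk]
    · subst hk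
      rw [List.getElem_append_right (by simp)]
      simp
    · rw [List.getElem_append_right (by simp; omega)]
      have : k - ia ≠ 0 := by omega
      rcases Nat.exists_eq_succ_of_ne_zero this with ⟨m, hm⟩
      simp [hm, Nat.ne_of_gt hk]

-- ===== VERDICT (by name: the statement is the Claim_ definition above) =====
theorem gen_crosswords_spec : Claim_equal_gen_crosswords := by
  intro word_a word_b _
  unfold Spec_gen_crosswords gen_crosswords gen_crosswords_alt
  dsimp only
  set as := word_a.toList with has
  set bs := word_b.toList with hbs0
  set D := (PySem.List.enumerate as).foldl
      (fun d p => if d.contains p.2 then d else d.insert p.2 p.1) PySem.Dict.empty with hDdef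
  have hget : ∀ c, D.get? c = if c ∈ as then some ((as.idxOf c : Nat) : Int) else none := by
    intro c
    rw [hDdef, gc_index_get as 0 PySem.Dict.empty c]
    simp
  have hcont : ∀ c, D.contains c = decide (c ∈ as) := by
    intro c
    rw [PySem.Dict.contains_eq_isSome_get?, hget c]
    by_cases hc : c ∈ as <;> simp [hc]
  rcases hfp : gcFirstIdx D (PySem.List.enumerate bs) with _ | j
  · -- no intersection: foo is empty, both return none
    have hnone := gc_firstIdx_none as D hcont bs 0 hfp
    rw [gc_filterMap_none word_a bs hnone]
  · -- intersection found
    obtain ⟨pre, c, suf, hbs, hpre, hc, hj⟩ := gc_firstIdx_some as D hcont bs 0 j hfp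
    have hj' : j = (pre.length : Int) := by rw [hj]; ring
    subst hj'
    set ia := as.idxOf c with hia0
    have hialt : ia < as.length := List.idxOf_lt_length_of_mem hc
    -- A side: head of foo, the crossing char, idx_b
    have hfindc : PySem.Str.find word_a (String.ofList [c]) = (ia : Int) := by
      rw [PySem.Str.find_eq, show (String.ofList [c]).toList = [c] from by simp, ← has, gc_findChar as c hc]
    have hfoo : bs.filterMap (fun c =>
        if PySem.Str.find word_a (String.ofList [c]) ≠ -1
        then some (PySem.Str.find word_a (String.ofList [c])) else none)
        = (ia : Int) :: suf.filterMap (fun c =>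
        if PySem.Str.find word_a (String.ofList [c]) ≠ -1
        then some (PySem.Str.find word_a (String.ofList [c])) else none) := by
      rw [hbs, List.filterMap_append, gc_filterMap_none word_a pre hpre]
      simp only [List.nil_append, List.filterMap_cons]
      rw [hfindc]
      have : (ia : Int) ≠ -1 := by omega
      simp [this]
    rw [hfoo]
    dsimp only
    have hch : PySem.Str.pyGet? word_a (ia : Int) = some c := by
      rw [PySem.Str.pyGet?_eq]
      show PySem.List.pyGet? as (ia : Int) = some c
      rw [PySem.List.pyGet?_eq_some_getElem _ (by omega) (by exact_mod_cast hialt)]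
      simp [hia0, List.getElem_idxOf]
    rw [hch]
    dsimp only
    have hcmem : c ∈ bs := by rw [hbs]; simp
    have hcpre : c ∉ pre := fun hx => hpre c hx hc
    have hidxb : bs.idxOf c = pre.length := by
      rw [hbs, List.idxOf_append_of_notMem hcpre]; simp
    have hfindb : PySem.Str.find word_b (String.ofList [c]) = (pre.length : Int) := by
      rw [PySem.Str.find_eq, show (String.ofList [c]).toList = [c] from by simp, ← hbs0, gc_findChar bs c hcmem, hidxb]
    rw [hfindb]
    -- B side: the char at the crossing row, the dict lookup
    have hblen : pre.length < bs.length := by rw [hbs]; simp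
    have hbget? : bs[pre.length]? = some c := by
      rw [hbs, List.getElem?_append_right (by simp)]
      simp
    have hbget : bs[pre.length]'hblen = c := by
      have h := List.getElem?_eq_getElem hblen
      rw [hbget?] at h
      exact (Option.some.inj h).symm
    have hchb : PySem.Str.pyGet? word_b ((pre.length : Nat) : Int) = some c := by
      rw [PySem.Str.pyGet?_eq]
      show PySem.List.pyGet? bs ((pre.length : Nat) : Int) = some c
      rw [PySem.List.pyGet?_eq_some_getElem _ (by omega) (by exact_mod_cast hblen)]
      simp [hbget]
    rw [hchb]
    dsimp only
    rw [hget c]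
    simp only [hc, if_true]
    -- the crossing-row overwrite on A's side
    set n := as.length with hn
    set m := bs.length with hm
    set ib := pre.length with hib
    have hiblt : ib < m := hblen
    have hset : PySem.List.pySet? ((PySem.List.enumerate bs).map (fun p =>
        String.ofList (List.replicate (Int.toNat (ia : Int)) '.' ++ [p.2] ++
          List.replicate (PySem.Str.len word_a - (ia : Int) - 1).toNat '.'))) (ib : Int) word_a
        = some ((((PySem.List.enumerate bs).map (fun p =>
        String.ofList (List.replicate (Int.toNat (ia : Int)) '.' ++ [p.2] ++
          List.replicate (PySem.Str.len word_a - (ia : Int) - 1).toNat '.'))).set ib word_a)) :=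
      PySem.List.pySet?_natCast _ _ _ (by simp only [List.length_map, PySem.List.length_enumerate]; exact hiblt)
    rw [hset]
    dsimp only
    -- the two joined lists coincide
    congr 1
    congr 1
    rw [← hia0]
    have hlenwa : PySem.Str.len word_a = (n : Int) := by rw [PySem.Str.len_eq, ← has, hn]
    have hlenwb : PySem.Str.len word_b = (m : Int) := by rw [PySem.Str.len_eq, ← hbs0, hm]
    rw [hlenwa, hlenwb, PySem.List.pyRange_zero_natCast m, List.map_map]
    apply List.ext_getElem
    · simp [PySem.List.length_enumerate, hm]
    · intro k h1 h2
      have hkm : k < m := by simpa [PySem.List.length_enumerate, hm] using h1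
      rw [List.getElem_set, List.getElem_map, List.getElem_map,
        PySem.List.getElem_enumerate bs 0 k (by simpa [PySem.List.length_enumerate, hm] using hkm),
        List.getElem_range]
      simp only [Function.comp]
      by_cases hkib : k = ib
      · rw [if_pos hkib.symm]
        have hrow : (PySem.List.pyRange 0 ((n : Nat) : Int)).map (fun i =>
            if (((k : Nat) : Int) == ((ib : Nat) : Int)) = true then PySem.List.pyGetD as i '.'
            else if (i == ((ia : Nat) : Int)) = true then PySem.List.pyGetD bs ((k : Nat) : Int) '.' else '.')
            = as := by
          have hf : ∀ i, (if (((k : Nat) : Int) == ((ib : Nat) : Int)) = true then PySem.List.pyGetD as i '.'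
            else if (i == ((ia : Nat) : Int)) = true then PySem.List.pyGetD bs ((k : Nat) : Int) '.' else '.')
            = PySem.List.pyGetD as i '.' := by intro i; simp [hkib]
          rw [funext hf, hn, PySem.List.map_pyGetD_pyRange_zero']
        rw [hrow, has, String.ofList_toList]
      · rw [if_neg (fun h : ib = k => hkib h.symm)]
        have hne : (((k : Nat) : Int) == ((ib : Nat) : Int)) = false := by
          simp
          omega
        have hpg : PySem.List.pyGetD bs ((k : Nat) : Int) '.' = bs[k]'hkm := by
          rw [PySem.List.pyGetD_eq_getElem bs '.' (by omega) (by exact_mod_cast hkm)]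
          simp
        have hrow : (PySem.List.pyRange 0 ((n : Nat) : Int)).map (fun i =>
            if (((k : Nat) : Int) == ((ib : Nat) : Int)) = true then PySem.List.pyGetD as i '.'
            else if (i == ((ia : Nat) : Int)) = true then PySem.List.pyGetD bs ((k : Nat) : Int) '.' else '.')
            = (List.range n).map (fun i => if i = ia then bs[k]'hkm else '.') := by
          rw [PySem.List.pyRange_zero_natCast n, List.map_map]
          apply List.map_congr_left
          intro i hi
          simp only [Function.comp, hne, Bool.false_eq_true, if_false, hpg]
          have hcast : (((i : Nat) : Int) == ((ia : Nat) : Int)) = decide (i = ia) := by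
            by_cases h : i = ia
            · simp [h]
            · simp [h]
          rw [hcast]
          by_cases h : i = ia <;> simp [h]
        rw [hrow, gc_row_eq n ia (by rw [hn]; exact hialt) _]
        have h1' : (Int.toNat (ia : Int)) = ia := by omega
        have h2' : ((n : Int) - (ia : Int) - 1).toNat = n - ia - 1 := by omega
        rw [h1', h2']
        simp
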